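-- pv_equiv track=rewrite | github.com/aidenisaman/pyRacerzRevamped | modules/ai_track_model.py | _erode_tiles
-- ===== SOURCE A (Python) =====
-- def _erode_tiles(seeds, radius, valid_area):
--   if radius <= 0:
--     return set(seeds)
--   seed_set = set(seeds)
--   out = set()
--   for tile in seed_set:
--     if tile not in valid_area:
--       continue
--     tx, ty = tile
--     keep = True
--     for dy in range(-radius, radius + 1):
--       for dx in range(-radius, radius + 1):
--         if dx * dx + dy * dy > radius * radius:
--           continue
--         n = (tx + dx, ty + dy)
--         if n not in valid_area:
--           continue
--         if n not in seed_set: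
--           keep = False
--           break
--       if not keep:
--         break
--     if keep:
--       out.add(tile)
--   return out
-- ===== SOURCE B (Python) =====
-- def _erode_tiles(seeds, radius, valid_area):
--     if radius <= 0:
--         return set(seeds)
--     seed_set = set(seeds)
--     valid_set = set(valid_area)
--     bad = valid_set - seed_set
--     r2 = radius * radius
--     # a seed survives iff no non-seed valid tile lies within Euclidean radius
--     return {t for t in seed_set
--             if t in valid_set
--             and all((t[0] - bx) * (t[0] - bx) + (t[1] - by) * (t[1] - by) > r2
--                     for bx, by in bad)}
-- ===== Notes on version B (the rewrite author's own statement) =====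
-- stated objective: alternative
-- what changed: B drops A's per-seed O(radius^2) disk enumeration: it builds the set of non-seed valid tiles once and keeps a seed iff its squared Euclidean distance to every such tile exceeds radius^2 (hashed sets instead of list scans); intended as faster for large radii (A timed out where B answered instantly) but a timing run could not confirm >=1.5x on inputs both finished.
import Mathlib
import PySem

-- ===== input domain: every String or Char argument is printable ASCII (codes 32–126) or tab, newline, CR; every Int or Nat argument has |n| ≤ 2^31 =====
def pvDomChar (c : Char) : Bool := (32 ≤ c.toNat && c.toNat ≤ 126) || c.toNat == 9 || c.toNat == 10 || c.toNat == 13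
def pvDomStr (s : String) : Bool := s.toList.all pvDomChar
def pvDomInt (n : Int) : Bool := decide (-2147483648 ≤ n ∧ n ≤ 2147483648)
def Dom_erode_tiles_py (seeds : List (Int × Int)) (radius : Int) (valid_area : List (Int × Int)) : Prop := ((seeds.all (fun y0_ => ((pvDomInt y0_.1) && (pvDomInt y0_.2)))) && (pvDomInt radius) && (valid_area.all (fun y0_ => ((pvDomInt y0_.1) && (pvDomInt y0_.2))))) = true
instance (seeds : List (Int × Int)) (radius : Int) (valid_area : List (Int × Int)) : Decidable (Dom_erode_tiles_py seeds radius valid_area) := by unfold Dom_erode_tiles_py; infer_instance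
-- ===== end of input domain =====

-- B replaces A's per-seed disk enumeration by a direct squared-Euclidean-distance
-- test of each seed against the non-seed valid tiles (objective: alternative).


-- ===== PORT A =====
-- the double loop with the break/flag `keep`; `.all` is that loop with its early exit
def erode_tiles_py (seeds : List (Int × Int)) (radius : Int) (valid_area : List (Int × Int)) : List (Int × Int) :=
  if radius ≤ 0 then PySem.Set.ofList seeds
  else
    let seed_set := PySem.Set.ofList seeds
    seed_set.foldl (fun out tile =>
      if tile ∉ valid_area then out
      else
        let tx := tile.1
        let ty := tile.2
        let keep := (PySem.List.pyRange (-radius) (radius + 1) 1).all (fun dy =>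
          (PySem.List.pyRange (-radius) (radius + 1) 1).all (fun dx =>
            if dx * dx + dy * dy > radius * radius then true
            else
              let n := (tx + dx, ty + dy)
              if n ∉ valid_area then true
              else decide (n ∈ seed_set)))
        if keep then PySem.Set.add out tile else out) PySem.Set.empty

-- ===== PORT B =====
def erode_tiles_py_alt (seeds : List (Int × Int)) (radius : Int) (valid_area : List (Int × Int)) : List (Int × Int) :=
  if radius ≤ 0 then PySem.Set.ofList seeds
  else
    let seed_set := PySem.Set.ofList seeds
    let valid_set := PySem.Set.ofList valid_area
    let bad := PySem.Set.diff valid_set seed_set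
    let r2 := radius * radius
    seed_set.filter (fun t =>
      decide (t ∈ valid_set) &&
      bad.all (fun b =>
        decide ((t.1 - b.1) * (t.1 - b.1) + (t.2 - b.2) * (t.2 - b.2) > r2)))

-- ===== PRECONDITION & SPEC =====
def Spec_erode_tiles_py (seeds : List (Int × Int)) (radius : Int) (valid_area : List (Int × Int)) (out : List (Int × Int)) : Prop := out = erode_tiles_py_alt seeds radius valid_area
instance (seeds : List (Int × Int)) (radius : Int) (valid_area : List (Int × Int)) (out : List (Int × Int)) : Decidable (Spec_erode_tiles_py seeds radius valid_area out) := by unfold Spec_erode_tiles_py; infer_instance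

-- ===== CLAIM (what is proved, stated in full; the proofs are below) =====
def Claim_equal_erode_tiles_py : Prop := ∀ (seeds : List (Int × Int)) (radius : Int) (valid_area : List (Int × Int)), Dom_erode_tiles_py seeds radius valid_area → Spec_erode_tiles_py seeds radius valid_area (erode_tiles_py seeds radius valid_area)

-- ===== LEMMAS AND PROOFS =====

-- A's accumulator loop "if keep(t): out.add(t)" over a nodup list is a filter
theorem foldl_add_ite_eq_filter {α : Type} [BEq α] [LawfulBEq α]
    (P : α → Prop) [DecidablePred P] (l acc : List α)
    (hd : ∀ x ∈ l, x ∉ acc) (hn : l.Nodup) :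
    l.foldl (fun out t => if P t then PySem.Set.add out t else out) acc
      = acc ++ l.filter (fun t => decide (P t)) := by
  induction l generalizing acc with
  | nil => simp
  | cons x t ih =>
    have hx : x ∉ acc := hd x (by simp)
    have hn' : t.Nodup := hn.of_cons
    have hxt : x ∉ t := (List.nodup_cons.mp hn).1
    simp only [List.foldl_cons, List.filter_cons]
    by_cases hP : P x
    · have hadd : PySem.Set.add acc x = acc ++ [x] := by
        simp [PySem.Set.add, PySem.Set.contains, hx]
      rw [if_pos hP, hadd, ih _ (by
        intro y hy
        simp only [List.mem_append, List.mem_singleton]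
        rintro (h | rfl)
        · exact hd y (by simp [hy]) h
        · exact hxt hy) hn']
      simp [hP]
    · rw [if_neg hP, ih _ (fun y hy => hd y (by simp [hy])) hn']
      simp [hP]

-- A's per-seed disk scan succeeds iff every non-seed valid tile is farther than radius
theorem keep_iff_far (seeds valid_area : List (Int × Int)) (radius : Int)
    (hr : 0 < radius) (t : Int × Int) :
    ((PySem.List.pyRange (-radius) (radius + 1) 1).all (fun dy =>
      (PySem.List.pyRange (-radius) (radius + 1) 1).all (fun dx =>
        if dx * dx + dy * dy > radius * radius then true
        else
          if (t.1 + dx, t.2 + dy) ∉ valid_area then true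
          else decide ((t.1 + dx, t.2 + dy) ∈ PySem.Set.ofList seeds))) = true)
    ↔ ∀ b ∈ valid_area, b ∉ PySem.Set.ofList seeds →
        (t.1 - b.1) * (t.1 - b.1) + (t.2 - b.2) * (t.2 - b.2) > radius * radius := by
  simp only [List.all_eq_true, PySem.List.mem_pyRange_one, PySem.Set.mem_ofList]
  constructor
  · rintro hkeep ⟨b1, b2⟩ hbv hbs
    by_contra hle
    simp only [not_lt] at hle
    have hdx2 : (b1 - t.1) * (b1 - t.1) ≤ radius * radius := by nlinarith
    have hdy2 : (b2 - t.2) * (b2 - t.2) ≤ radius * radius := by nlinarith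
    have hdxb : -radius ≤ b1 - t.1 ∧ b1 - t.1 < radius + 1 := by
      constructor <;> nlinarith
    have hdyb : -radius ≤ b2 - t.2 ∧ b2 - t.2 < radius + 1 := by
      constructor <;> nlinarith
    have h := hkeep (b2 - t.2) hdyb (b1 - t.1) hdxb
    rw [if_neg (by simp only [not_lt, gt_iff_lt]; nlinarith)] at h
    have hbv' : (t.1 + (b1 - t.1), t.2 + (b2 - t.2)) ∈ valid_area := by
      have he : (t.1 + (b1 - t.1), t.2 + (b2 - t.2)) = (b1, b2) := by
        simp
      rwa [he]
    rw [if_neg (by simpa using hbv'), decide_eq_true_eq] at h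
    apply hbs
    have he : (t.1 + (b1 - t.1), t.2 + (b2 - t.2)) = (b1, b2) := by
      simp
    rwa [he] at h
  · intro hfar dy hdy dx hdx
    split_ifs with hgt hnv
    · rfl
    · simp only [decide_eq_true_eq]
      by_contra hns
      have := hfar (t.1 + dx, t.2 + dy) hnv hns
      simp only [not_lt, gt_iff_lt] at hgt this
      nlinarith
    · rfl

-- ===== VERDICT (by name: the statement is the Claim_ definition above) =====
theorem erode_tiles_py_spec : Claim_equal_erode_tiles_py := by
  intro seeds radius valid_area _
  unfold Spec_erode_tiles_py erode_tiles_py erode_tiles_py_alt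
  by_cases hr : radius ≤ 0
  · simp [hr]
  · simp only [if_neg hr]
    set SS := PySem.Set.ofList seeds with hSS
    set VS := PySem.Set.ofList valid_area with hVS
    -- A's loop is a filter over the nodup seed set
    have hAcongr : SS.foldl (fun out tile =>
        if tile ∉ valid_area then out
        else
          if (PySem.List.pyRange (-radius) (radius + 1) 1).all (fun dy =>
            (PySem.List.pyRange (-radius) (radius + 1) 1).all (fun dx =>
              if dx * dx + dy * dy > radius * radius then true
              else
                if (tile.1 + dx, tile.2 + dy) ∉ valid_area then true
                else decide ((tile.1 + dx, tile.2 + dy) ∈ SS)))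
          then PySem.Set.add out tile else out) PySem.Set.empty
        = SS.foldl (fun out tile =>
            if (¬ (tile ∉ valid_area) ∧
              ((PySem.List.pyRange (-radius) (radius + 1) 1).all (fun dy =>
                (PySem.List.pyRange (-radius) (radius + 1) 1).all (fun dx =>
                  if dx * dx + dy * dy > radius * radius then true
                  else
                    if (tile.1 + dx, tile.2 + dy) ∉ valid_area then true
                    else decide ((tile.1 + dx, tile.2 + dy) ∈ SS))) = true))
            then PySem.Set.add out tile else out)
            PySem.Set.empty := by
      apply PySem.List.foldl_congr_mem
      intro out tile _
      by_cases hv : tile ∉ valid_area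
      · simp [hv]
      · simp [hv]
    refine (hAcongr.trans (foldl_add_ite_eq_filter
      (P := fun tile : Int × Int => ¬ (tile ∉ valid_area) ∧
        ((PySem.List.pyRange (-radius) (radius + 1) 1).all (fun dy =>
          (PySem.List.pyRange (-radius) (radius + 1) 1).all (fun dx =>
            if dx * dx + dy * dy > radius * radius then true
            else
              if (tile.1 + dx, tile.2 + dy) ∉ valid_area then true
              else decide ((tile.1 + dx, tile.2 + dy) ∈ SS))) = true))
      SS PySem.Set.empty
      (by intro x _ h; simp [PySem.Set.empty] at h)
      (hSS ▸ PySem.Set.nodup_ofList seeds))).trans ?_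
    simp only [PySem.Set.empty, List.nil_append]
    -- pointwise equality of the two filter predicates
    apply List.filter_congr
    intro t _
    rw [Bool.eq_iff_iff]
    simp only [decide_eq_true_eq, Bool.and_eq_true]
    have hk := keep_iff_far seeds valid_area radius (by omega) t
    rw [← hSS] at hk
    rw [hk, List.all_eq_true]
    constructor
    · rintro ⟨hv, hfarA⟩
      refine ⟨by simpa [hVS, PySem.Set.mem_ofList] using not_not.mp hv, ?_⟩
      intro b hb
      obtain ⟨hbv, hbs⟩ := (PySem.Set.mem_diff _ _ _).mp hb
      simp only [decide_eq_true_eq]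
      exact hfarA b (by simpa [hVS, PySem.Set.mem_ofList] using hbv) hbs
    · rintro ⟨hv, hfar⟩
      refine ⟨not_not.mpr (by simpa [hVS, PySem.Set.mem_ofList] using hv), ?_⟩
      intro b hbv hbs
      have hb : b ∈ PySem.Set.diff VS SS := (PySem.Set.mem_diff _ _ _).mpr
        ⟨by simpa [hVS, PySem.Set.mem_ofList] using hbv, hbs⟩
      simpa using hfar b hb
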